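-- pv_equiv track=rewrite | github.com/skjapps/AdventofCode | day6.py | find_trap_positions
-- ===== SOURCE A (Python) =====
-- def find_trap_positions(matrix):
--     """Find positions where an extra # traps the guards in a loop."""
--     rows = len(matrix)
--     cols = len(matrix[0]) if rows > 0 else 0
--
--     def simulate(matrix, guards):
--         """Simulates the guards' movement and detects loops."""
--         visited_states = set()
--         steps = 0
--
--         while guards:
--             new_guards = []
--             for x, y, direction in guards:
--                 if (x, y, direction) in visited_states:
--                     return True  # Loop detected
--                 visited_states.add((x, y, direction))
--
--                 new_x, new_y = x, y
--                 if direction == "^":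
--                     new_y -= 1
--                 elif direction == "V":
--                     new_y += 1
--                 elif direction == ">":
--                     new_x += 1
--                 elif direction == "<":
--                     new_x -= 1
--
--                 if not (0 <= new_x < cols and 0 <= new_y < rows) or matrix[new_y][new_x] == "X":
--                     continue  # Out of bounds or visited
--                 if matrix[new_y][new_x] == "#":
--                     # Turn right
--                     if direction == "^":
--                         direction = ">"
--                     elif direction == ">":
--                         direction = "V"
--                     elif direction == "V":
--                         direction = "<"
--                     elif direction == "<":
--                         direction = "^"
--                 else:
--                     # Move forward
--                     x, y = new_x, new_y
--                 new_guards.append((x, y, direction))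
--
--             guards = new_guards
--             steps += 1
--             if steps > rows * cols:
--                 return True  # Failsafe for infinite loops
--
--         return False
--
--     # Identify initial guard positions and directions
--     guards = []
--     for y in range(rows):
--         for x in range(cols):
--             if matrix[y][x] in "^V<>":
--                 guards.append((x, y, matrix[y][x]))
--
--     # Test each empty cell for trap placement
--     trap_positions = 0
--     for y in range(rows):
--         for x in range(cols):
--             if matrix[y][x] == ".":
--                 # Place a temporary trap
--                 matrix[y][x] = "#"
--                 if simulate([row[:] for row in matrix], guards):
--                     trap_positions += 1
--                 # Remove the temporary trap
--                 matrix[y][x] = "."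
--
--     return trap_positions
-- ===== SOURCE B (Python) =====
-- DIRS = {"^": 0, ">": 1, "V": 2, "<": 3}   # direction encoding; 4 = unrecognised token (stands still)
-- DX = (0, 1, 0, -1, 0)
-- DY = (-1, 0, 1, 0, 0)
-- TURN = (1, 2, 3, 0, 4)
--
--
-- def find_trap_positions(matrix):
--     """Count trap placements forcing the guards into a loop.
--
--     Directions are table-encoded ints; one walk on the unmodified grid
--     records every cell it reads, and only '.' cells in that touched set
--     are re-simulated -- every other '.' cell reuses the base verdict."""
--     height = len(matrix)
--     width = len(matrix[0]) if height > 0 else 0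
--     starts = [(gx, gy, DIRS.get(matrix[gy][gx], 4))
--               for gy in range(height) for gx in range(width)
--               if matrix[gy][gx] in "^V<>"]
--
--     def walk(grid):
--         # one joint simulation; returns (loop verdict, set of cells read)
--         seen, touched = set(), set()
--         gen, budget = starts, height * width
--         while gen:
--             pending = []
--             for gx, gy, gd in gen:
--                 if (gx, gy, gd) in seen:
--                     return True, touched
--                 seen.add((gx, gy, gd))
--                 tx, ty = gx + DX[gd], gy + DY[gd]
--                 if 0 <= tx < width and 0 <= ty < height:
--                     touched.add((tx, ty))
--                     line = grid[ty]
--                     cell = line[tx]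
--                     if cell != "X":
--                         pending.append((gx, gy, TURN[gd]) if cell == "#" else (tx, ty, gd))
--             if budget == 0:
--                 return True, touched
--             budget -= 1
--             gen = pending
--         return False, touched
--
--     base_loops, touched = walk(matrix)
--     total = 0
--     for gy in range(height):
--         for gx in range(width):
--             if matrix[gy][gx] == ".":
--                 if (gx, gy) in touched:
--                     trapped = [line[:] for line in matrix]
--                     trapped[gy][gx] = "#"
--                     if walk(trapped)[0]:
--                         total += 1
--                 elif base_loops:
--                     total += 1
--     return total
-- ===== Notes on version B (the rewrite author's own statement) =====
-- stated objective: alternative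
-- what changed: B encodes directions as table indices (DX/DY/TURN lookup instead of A's if/elif chains), simulates the walk once on the unmodified grid recording every cell it reads, and re-simulates only trap candidates in that touched set, reusing the base verdict for every other '.' cell, instead of A's full simulation for every '.' cell of the grid.
import Mathlib
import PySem

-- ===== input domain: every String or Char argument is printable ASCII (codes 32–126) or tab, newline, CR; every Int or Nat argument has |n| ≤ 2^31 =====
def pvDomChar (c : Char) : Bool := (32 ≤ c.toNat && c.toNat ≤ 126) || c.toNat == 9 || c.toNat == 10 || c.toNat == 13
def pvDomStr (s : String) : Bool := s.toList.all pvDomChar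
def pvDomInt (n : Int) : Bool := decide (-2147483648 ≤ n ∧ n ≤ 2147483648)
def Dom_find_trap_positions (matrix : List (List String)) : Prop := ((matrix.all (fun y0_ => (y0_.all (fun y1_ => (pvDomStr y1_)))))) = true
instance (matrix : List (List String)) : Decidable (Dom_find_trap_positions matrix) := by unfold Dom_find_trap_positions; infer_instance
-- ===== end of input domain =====

-- B encodes directions as table indices and retests only '.' cells the original walk reads.
-- A transiently mutates `matrix` in place (it restores every cell before returning); B does not mutate it.

-- ===== PORT A =====
def pvCell (m : List (List String)) (y x : Int) : String :=
  (m.getD y.toNat []).getD x.toNat ""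

def pvSetCell (m : List (List String)) (y x : Int) (v : String) : List (List String) :=
  m.set y.toNat ((m.getD y.toNat []).set x.toNat v)

def pvMove (x y : Int) (d : String) : Int × Int :=
  if d = "^" then (x, y - 1)
  else if d = "V" then (x, y + 1)
  else if d = ">" then (x + 1, y)
  else if d = "<" then (x - 1, y)
  else (x, y)

def pvTurn (d : String) : String :=
  if d = "^" then ">" else if d = ">" then "V" else if d = "V" then "<"
  else if d = "<" then "^" else d

-- one pass of A's `for x, y, direction in guards` loop body (while-loop generation);
-- result `none` = loop detected (early `return True`)
def pvGenA (rows cols : Int) (mat : List (List String)) :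
    List (Int × Int × String) → PySem.Set (Int × Int × String) → List (Int × Int × String) →
    Option (PySem.Set (Int × Int × String) × List (Int × Int × String))
  | [], vis, acc => some (vis, acc)
  | (x, y, d) :: rest, vis, acc =>
    if PySem.Set.contains vis (x, y, d) then none
    else
      let vis' := PySem.Set.add vis (x, y, d)
      let nx := (pvMove x y d).1
      let ny := (pvMove x y d).2
      if ¬ (0 ≤ nx ∧ nx < cols ∧ 0 ≤ ny ∧ ny < rows) ∨ pvCell mat ny nx = "X" then
        pvGenA rows cols mat rest vis' acc
      else if pvCell mat ny nx = "#" then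
        pvGenA rows cols mat rest vis' (acc ++ [(x, y, pvTurn d)])
      else
        pvGenA rows cols mat rest vis' (acc ++ [(nx, ny, d)])

-- A's `while guards:` loop; `fuel` = rows*cols - steps, so fuel = 0 after a
-- generation is exactly A's failsafe `steps > rows * cols`
def pvSimA (rows cols : Int) (mat : List (List String)) :
    Nat → List (Int × Int × String) → PySem.Set (Int × Int × String) → Bool
  | fuel, guards, vis =>
    match guards with
    | [] => false
    | _ :: _ =>
      match pvGenA rows cols mat guards vis [] with
      | none => true
      | some (vis', guards') =>
        match fuel with
        | 0 => true
        | f + 1 => pvSimA rows cols mat f guards' vis'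

def find_trap_positions (matrix : List (List String)) : Int :=
  let rows : Int := matrix.length
  let cols : Int := if rows > 0 then ((matrix.headD []).length : Int) else 0
  let guards : List (Int × Int × String) :=
    (PySem.List.pyRange 0 rows 1).foldl (fun acc y =>
      (PySem.List.pyRange 0 cols 1).foldl (fun acc x =>
        if PySem.Str.isIn (pvCell matrix y x) "^V<>" then acc ++ [(x, y, pvCell matrix y x)]
        else acc) acc) []
  (PySem.List.pyRange 0 rows 1).foldl (fun cnt y =>
    (PySem.List.pyRange 0 cols 1).foldl (fun cnt x =>
      if pvCell matrix y x = "." then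
        cnt + (if pvSimA rows cols (pvSetCell matrix y x "#") (rows * cols).toNat guards [] then 1 else 0)
      else cnt) cnt) 0

-- ===== PORT B =====
-- B's direction tables: DIRS.get(ch, 4), DX, DY, TURN
def pvDirIdx (d : String) : Int :=
  if d = "^" then 0 else if d = ">" then 1 else if d = "V" then 2
  else if d = "<" then 3 else 4

def pvDX : List Int := [0, 1, 0, -1, 0]
def pvDY : List Int := [-1, 0, 1, 0, 0]
def pvTurnT : List Int := [1, 2, 3, 0, 4]

-- one step of B's inner `for gx, gy, gd in gen` loop, folded over the generation:
-- state = (none = loop detected | some (seen states, next generation), touched cells).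
-- DX[gd]/DY[gd]/TURN[gd] are ported with getD: exact here since the encoded direction
-- is always 0..4 and the tables have length 5.
def pvStepB (height width : Int) (grid : List (List String))
    (state : Option (PySem.Set (Int × Int × Int) × List (Int × Int × Int)) × PySem.Set (Int × Int))
    (guard : Int × Int × Int) :
    Option (PySem.Set (Int × Int × Int) × List (Int × Int × Int)) × PySem.Set (Int × Int) :=
  match state, guard with
  | (none, touched), _ => (none, touched)
  | (some (seen, pending), touched), (gx, gy, gd) =>
    if PySem.Set.contains seen (gx, gy, gd) then (none, touched)
    else
      let seen' := PySem.Set.add seen (gx, gy, gd)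
      let tx := gx + pvDX.getD gd.toNat 0
      let ty := gy + pvDY.getD gd.toNat 0
      if 0 ≤ tx ∧ tx < width ∧ 0 ≤ ty ∧ ty < height then
        let touched' := PySem.Set.add touched (tx, ty)
        let line := grid.getD ty.toNat []
        let cell := line.getD tx.toNat ""
        if cell = "X" then (some (seen', pending), touched')
        else (some (seen', pending ++
          [if cell = "#" then (gx, gy, pvTurnT.getD gd.toNat 0) else (tx, ty, gd)]), touched')
      else (some (seen', pending), touched)

-- B's walk: returns (loop verdict, touched cells); `budget` counts down from height*width
def pvSimB (height width : Int) (grid : List (List String)) :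
    Nat → List (Int × Int × Int) → PySem.Set (Int × Int × Int) → PySem.Set (Int × Int) →
    Bool × PySem.Set (Int × Int)
  | budget, gen, seen, touched =>
    match gen with
    | [] => (false, touched)
    | _ :: _ =>
      match gen.foldl (pvStepB height width grid) (some (seen, []), touched) with
      | (none, touched') => (true, touched')
      | (some (seen', pending), touched') =>
        match budget with
        | 0 => (true, touched')
        | rem + 1 => pvSimB height width grid rem pending seen' touched'

def find_trap_positions_alt (matrix : List (List String)) : Int :=
  let height : Int := matrix.length
  let width : Int := if height > 0 then ((matrix.headD []).length : Int) else 0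
  let starts : List (Int × Int × Int) :=
    (PySem.List.pyRange 0 height 1).flatMap (fun gy =>
      ((PySem.List.pyRange 0 width 1).filter
          (fun gx => PySem.Str.isIn (pvCell matrix gy gx) "^V<>")).map
        (fun gx => (gx, gy, pvDirIdx (pvCell matrix gy gx))))
  let base := pvSimB height width matrix (height * width).toNat starts [] []
  (PySem.List.pyRange 0 height 1).foldl (fun total gy =>
    (PySem.List.pyRange 0 width 1).foldl (fun total gx =>
      if pvCell matrix gy gx = "." then
        if PySem.Set.contains base.2 (gx, gy) then
          total + (if (pvSimB height width (pvSetCell matrix gy gx "#") (height * width).toNat starts [] []).1 then 1 else 0)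
        else if base.1 then total + 1 else total
      else total) total) 0

-- ===== PRECONDITION & SPEC =====
-- Pre_ excludes exactly the ragged matrices on which A raises IndexError
-- (some row shorter than the first row: the x-scan over range(len(matrix[0])) indexes past it).
def Pre_find_trap_positions (matrix : List (List String)) : Prop :=
  ∀ row ∈ matrix, (matrix.headD []).length ≤ row.length
instance (matrix : List (List String)) : Decidable (Pre_find_trap_positions matrix) := by
  unfold Pre_find_trap_positions; infer_instance

def pvWitness_find_trap_positions : List (List String) :=
  [[".", "#", "."], [".", "^", "."], [".", ".", "."]]

def Spec_find_trap_positions (matrix : List (List String)) (out : Int) : Prop :=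
  out = find_trap_positions_alt matrix
instance (matrix : List (List String)) (out : Int) : Decidable (Spec_find_trap_positions matrix out) := by
  unfold Spec_find_trap_positions; infer_instance

-- ===== CLAIM (what is proved, stated in full; the proofs are below) =====
def Claim_equal_find_trap_positions : Prop :=
  ∀ (matrix : List (List String)), Dom_find_trap_positions matrix →
    Pre_find_trap_positions matrix →
    Spec_find_trap_positions matrix (find_trap_positions matrix)

-- ===== LEMMAS AND PROOFS =====

-- encoding of an A-state as a B-state
def pvEncS (s : Int × Int × String) : Int × Int × Int := (s.1, s.2.1, pvDirIdx s.2.2)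

-- invariant: a state whose direction string is none of the four arrows never moved,
-- so its direction string is exactly its own cell of the simulated matrix
def pvInv (mat : List (List String)) (s : Int × Int × String) : Prop :=
  pvDirIdx s.2.2 = 4 → pvCell mat s.2.1 s.1 = s.2.2

theorem pvDirIdx_inj_or (d d' : String) (h : pvDirIdx d = pvDirIdx d') :
    d = d' ∨ (pvDirIdx d = 4 ∧ pvDirIdx d' = 4) := by
  unfold pvDirIdx at *
  split_ifs at * <;> simp_all

theorem pvEncS_inj (mat : List (List String)) (s t : Int × Int × String)
    (hs : pvInv mat s) (ht : pvInv mat t) (h : pvEncS s = pvEncS t) : s = t := by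
  obtain ⟨x, y, d⟩ := s; obtain ⟨x', y', d'⟩ := t
  simp only [pvEncS, Prod.mk.injEq] at h
  obtain ⟨hx, hy, hd⟩ := h
  subst hx; subst hy
  simp only [Prod.mk.injEq, true_and]
  rcases pvDirIdx_inj_or d d' hd with h | ⟨h4, h4'⟩
  · exact h
  · exact (hs h4).symm.trans (ht h4')

theorem pvMem_map_encS (mat : List (List String)) (s : Int × Int × String)
    (vis : List (Int × Int × String)) (hs : pvInv mat s) (hvis : ∀ t ∈ vis, pvInv mat t) :
    (pvEncS s ∈ vis.map pvEncS) ↔ s ∈ vis := by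
  constructor
  · intro h
    obtain ⟨t, htv, hte⟩ := List.mem_map.mp h
    exact (pvEncS_inj mat t s (hvis t htv) hs hte) ▸ htv
  · intro h; exact List.mem_map_of_mem h

theorem pvContains_map_encS (mat : List (List String)) (s : Int × Int × String)
    (vis : PySem.Set (Int × Int × String)) (hs : pvInv mat s) (hvis : ∀ t ∈ vis, pvInv mat t) :
    PySem.Set.contains (vis.map pvEncS) (pvEncS s) = PySem.Set.contains vis s := by
  rw [Bool.eq_iff_iff, PySem.Set.contains_iff, PySem.Set.contains_iff]
  exact pvMem_map_encS mat s vis hs hvis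

theorem pvAdd_map_encS (mat : List (List String)) (s : Int × Int × String)
    (vis : PySem.Set (Int × Int × String)) (hs : pvInv mat s) (hvis : ∀ t ∈ vis, pvInv mat t) :
    PySem.Set.add (vis.map pvEncS) (pvEncS s) = (PySem.Set.add vis s).map pvEncS := by
  unfold PySem.Set.add
  rw [pvContains_map_encS mat s vis hs hvis]
  split_ifs <;> simp

-- the tables compute exactly A's move and turn
theorem pvMove_tables (x y : Int) (d : String) :
    (x + pvDX.getD (pvDirIdx d).toNat 0, y + pvDY.getD (pvDirIdx d).toNat 0) = pvMove x y d := by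
  unfold pvDirIdx pvMove pvDX pvDY
  split_ifs <;> simp_all [Prod.ext_iff] <;> omega

theorem pvTurn_tables (d : String) :
    pvTurnT.getD (pvDirIdx d).toNat 0 = pvDirIdx (pvTurn d) := by
  unfold pvDirIdx pvTurn pvTurnT
  split_ifs <;> simp_all

theorem pvTurn_weird (d : String) (h : pvDirIdx (pvTurn d) = 4) :
    pvTurn d = d ∧ pvDirIdx d = 4 := by
  unfold pvDirIdx pvTurn at *
  split_ifs at * <;> simp_all

theorem pvMove_weird (x y : Int) (d : String) (h : pvDirIdx d = 4) :
    pvMove x y d = (x, y) := by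
  unfold pvDirIdx at h
  unfold pvMove
  split_ifs at * <;> simp_all

theorem pvInv_turn (mat : List (List String)) (x y : Int) (d : String)
    (h : pvInv mat (x, y, d)) : pvInv mat (x, y, pvTurn d) := by
  intro h4
  obtain ⟨he, h4'⟩ := pvTurn_weird d h4
  rw [he]; exact h h4'

-- a detected loop is absorbing for the fold
theorem pvFoldB_none (rows cols : Int) (mat : List (List String))
    (l : List (Int × Int × Int)) (tch : PySem.Set (Int × Int)) :
    l.foldl (pvStepB rows cols mat) (none, tch) = (none, tch) := by
  induction l with
  | nil => rfl
  | cons g rest ih => simpa [pvStepB] using ih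

-- folding B's step over a generation is A's generation pass through the encoding,
-- and A's pass keeps the invariant on its outputs
theorem pvGenAB (rows cols : Int) (mat : List (List String))
    (gs : List (Int × Int × String)) (vis : PySem.Set (Int × Int × String))
    (tch : PySem.Set (Int × Int)) (acc : List (Int × Int × String))
    (hgs : ∀ s ∈ gs, pvInv mat s) (hvis : ∀ s ∈ vis, pvInv mat s)
    (hacc : ∀ s ∈ acc, pvInv mat s) :
    ((gs.map pvEncS).foldl (pvStepB rows cols mat)
        (some (vis.map pvEncS, acc.map pvEncS), tch)).1
      = (pvGenA rows cols mat gs vis acc).map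
          (fun p => (p.1.map pvEncS, p.2.map pvEncS))
    ∧ ∀ v' g', pvGenA rows cols mat gs vis acc = some (v', g') →
        (∀ s ∈ v', pvInv mat s) ∧ (∀ s ∈ g', pvInv mat s) := by
  induction gs generalizing vis tch acc with
  | nil =>
    refine ⟨rfl, ?_⟩
    intro v' g' h
    simp only [pvGenA, Option.some.injEq, Prod.mk.injEq] at h
    exact ⟨h.1 ▸ hvis, h.2 ▸ hacc⟩
  | cons g rest ih =>
    obtain ⟨x, y, d⟩ := g
    have hg : pvInv mat (x, y, d) := hgs _ List.mem_cons_self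
    have hrest : ∀ s ∈ rest, pvInv mat s := fun s hs => hgs s (List.mem_cons_of_mem _ hs)
    have hvis' : ∀ s ∈ PySem.Set.add vis (x, y, d), pvInv mat s := by
      intro s hs
      rcases (PySem.Set.mem_add vis (x, y, d) s).mp hs with h | h
      · exact hvis s h
      · rw [h]; exact hg
    have hcont := pvContains_map_encS mat (x, y, d) vis hg hvis
    have hadd := pvAdd_map_encS mat (x, y, d) vis hg hvis
    simp only [pvEncS] at hcont hadd
    have hnx : x + pvDX.getD (pvDirIdx d).toNat 0 = (pvMove x y d).1 := by
      rw [← pvMove_tables x y d]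
    have hny : y + pvDY.getD (pvDirIdx d).toNat 0 = (pvMove x y d).2 := by
      rw [← pvMove_tables x y d]
    have hcc : ∀ a b : Int, (mat.getD b.toNat []).getD a.toNat "" = pvCell mat b a :=
      fun a b => rfl
    simp only [List.map_cons, List.foldl_cons, pvStepB, pvGenA, pvEncS, hcont, hadd,
      hnx, hny, hcc]
    by_cases hv : PySem.Set.contains vis (x, y, d) = true
    · rw [if_pos hv, if_pos hv]
      refine ⟨?_, by intro v' g' h; simp at h⟩
      rw [pvFoldB_none]
      rfl
    · rw [if_neg hv, if_neg hv]
      by_cases hb : (0 ≤ (pvMove x y d).1 ∧ (pvMove x y d).1 < cols ∧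
          0 ≤ (pvMove x y d).2 ∧ (pvMove x y d).2 < rows)
      · rw [if_pos hb]
        by_cases hX : pvCell mat (pvMove x y d).2 (pvMove x y d).1 = "X"
        · rw [if_pos hX, if_pos (show ¬(0 ≤ (pvMove x y d).1 ∧ (pvMove x y d).1 < cols ∧
              0 ≤ (pvMove x y d).2 ∧ (pvMove x y d).2 < rows) ∨
              pvCell mat (pvMove x y d).2 (pvMove x y d).1 = "X" from Or.inr hX)]
          exact ih _ _ _ hrest hvis' hacc
        · rw [if_neg hX, if_neg (show ¬(¬(0 ≤ (pvMove x y d).1 ∧ (pvMove x y d).1 < cols ∧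
              0 ≤ (pvMove x y d).2 ∧ (pvMove x y d).2 < rows) ∨
              pvCell mat (pvMove x y d).2 (pvMove x y d).1 = "X")
            from fun h => h.elim (fun hnb => hnb hb) hX)]
          by_cases hH : pvCell mat (pvMove x y d).2 (pvMove x y d).1 = "#"
          · rw [if_pos hH, if_pos hH, pvTurn_tables]
            have hacc' : ∀ s ∈ acc ++ [(x, y, pvTurn d)], pvInv mat s := by
              intro s hs
              rcases List.mem_append.mp hs with h | h
              · exact hacc s h
              · simp only [List.mem_singleton] at h
                exact h ▸ pvInv_turn mat x y d hg
            have := ih (PySem.Set.add vis (x, y, d))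
              (PySem.Set.add tch ((pvMove x y d).1, (pvMove x y d).2))
              (acc ++ [(x, y, pvTurn d)]) hrest hvis' hacc'
            simpa [pvEncS] using this
          · rw [if_neg hH, if_neg hH]
            have hacc' : ∀ s ∈ acc ++ [((pvMove x y d).1, (pvMove x y d).2, d)],
                pvInv mat s := by
              intro s hs
              rcases List.mem_append.mp hs with h | h
              · exact hacc s h
              · simp only [List.mem_singleton] at h
                subst h
                intro h4
                have hm := pvMove_weird x y d h4
                rw [hm]
                exact hg h4
            have := ih (PySem.Set.add vis (x, y, d))
              (PySem.Set.add tch ((pvMove x y d).1, (pvMove x y d).2))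
              (acc ++ [((pvMove x y d).1, (pvMove x y d).2, d)]) hrest hvis' hacc'
            simpa [pvEncS] using this
      · rw [if_neg hb, if_pos (show ¬(0 ≤ (pvMove x y d).1 ∧ (pvMove x y d).1 < cols ∧
            0 ≤ (pvMove x y d).2 ∧ (pvMove x y d).2 < rows) ∨
            pvCell mat (pvMove x y d).2 (pvMove x y d).1 = "X" from Or.inl hb)]
        exact ih _ _ _ hrest hvis' hacc

-- B's walk decides exactly A's walk through the encoding
theorem pvSimAB (rows cols : Int) (mat : List (List String)) (fuel : Nat)
    (gs : List (Int × Int × String)) (vis : PySem.Set (Int × Int × String))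
    (tch : PySem.Set (Int × Int))
    (hgs : ∀ s ∈ gs, pvInv mat s) (hvis : ∀ s ∈ vis, pvInv mat s) :
    (pvSimB rows cols mat fuel (gs.map pvEncS) (vis.map pvEncS) tch).1
      = pvSimA rows cols mat fuel gs vis := by
  induction fuel generalizing gs vis tch with
  | zero =>
    cases gs with
    | nil => rfl
    | cons g rest =>
      simp only [pvSimB, pvSimA, List.map_cons]
      rcases hB : (pvEncS g :: rest.map pvEncS).foldl (pvStepB rows cols mat)
          (some (vis.map pvEncS, []), tch) with ⟨o, t⟩
      rcases hA : pvGenA rows cols mat (g :: rest) vis [] with _ | ⟨vis', nxt⟩ <;>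
        rcases o with _ | ⟨ov, og⟩ <;> rfl
  | succ f ihf =>
    cases gs with
    | nil => rfl
    | cons g rest =>
      have hAB := (pvGenAB rows cols mat (g :: rest) vis tch [] hgs hvis (by simp)).1
      have hInv := (pvGenAB rows cols mat (g :: rest) vis tch [] hgs hvis (by simp)).2
      simp only [List.map_cons, List.map_nil] at hAB hInv
      simp only [pvSimB, pvSimA, List.map_cons]
      rcases hA : pvGenA rows cols mat (g :: rest) vis [] with _ | ⟨vis', nxt⟩ <;>
        rw [hA] at hAB <;>
        rcases hB : (pvEncS g :: rest.map pvEncS).foldl (pvStepB rows cols mat)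
          (some (vis.map pvEncS, []), tch) with ⟨o, t⟩ <;>
        rw [hB] at hAB
      · obtain rfl : o = none := by simpa using hAB
        rfl
      · obtain rfl : o = some (vis'.map pvEncS, nxt.map pvEncS) := by simpa using hAB
        obtain ⟨hv', hn'⟩ := hInv vis' nxt hA
        exact ihf nxt vis' t hn' hv'

-- touched only grows within a generation
theorem pvFoldB_touched_mono (rows cols : Int) (mat : List (List String))
    (gs : List (Int × Int × Int))
    (o : Option (PySem.Set (Int × Int × Int) × List (Int × Int × Int)))
    (tch : PySem.Set (Int × Int))
    (c : Int × Int) (hc : c ∈ tch) :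
    c ∈ (gs.foldl (pvStepB rows cols mat) (o, tch)).2 := by
  induction gs generalizing o tch with
  | nil => exact hc
  | cons g rest ih =>
    obtain ⟨x, y, d⟩ := g
    rcases o with _ | ⟨vis, nxt⟩
    · simpa [List.foldl_cons, pvStepB] using ih none tch hc
    · simp only [List.foldl_cons, pvStepB]
      split_ifs <;>
        first
          | exact ih _ _ hc
          | exact ih _ _ (by rw [PySem.Set.mem_add]; exact Or.inl hc)

-- touched only grows along the whole walk
theorem pvSimB_touched_mono (rows cols : Int) (mat : List (List String)) (fuel : Nat)
    (cur : List (Int × Int × Int)) (vis : PySem.Set (Int × Int × Int))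
    (tch : PySem.Set (Int × Int)) (c : Int × Int) (hc : c ∈ tch) :
    c ∈ (pvSimB rows cols mat fuel cur vis tch).2 := by
  induction fuel generalizing cur vis tch with
  | zero =>
    cases cur with
    | nil => exact hc
    | cons g rest =>
      have hm := pvFoldB_touched_mono rows cols mat (g :: rest) (some (vis, [])) tch c hc
      rcases hB : (g :: rest).foldl (pvStepB rows cols mat) (some (vis, []), tch) with ⟨o, t⟩
      rw [hB] at hm
      simp only [pvSimB, hB]
      rcases o with _ | ⟨vis', nxt⟩ <;> exact hm
  | succ f ih =>
    cases cur with
    | nil => exact hc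
    | cons g rest =>
      have hm := pvFoldB_touched_mono rows cols mat (g :: rest) (some (vis, [])) tch c hc
      rcases hB : (g :: rest).foldl (pvStepB rows cols mat) (some (vis, []), tch) with ⟨o, t⟩
      rw [hB] at hm
      simp only [pvSimB, hB]
      rcases o with _ | ⟨vis', nxt⟩
      · exact hm
      · exact ih nxt vis' t hm

-- a generation reads only cells stamped into its touched output: if the trap cell
-- is not in it, the fold cannot tell mat' from mat
theorem pvFoldB_untouched (rows cols : Int) (mat mat' : List (List String)) (t : Int × Int)
    (hcell : ∀ a b : Int, 0 ≤ a → a < cols → 0 ≤ b → b < rows → (a, b) ≠ t →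
      pvCell mat' b a = pvCell mat b a)
    (gs : List (Int × Int × Int))
    (o : Option (PySem.Set (Int × Int × Int) × List (Int × Int × Int)))
    (tch : PySem.Set (Int × Int))
    (ht : t ∉ (gs.foldl (pvStepB rows cols mat) (o, tch)).2) :
    gs.foldl (pvStepB rows cols mat') (o, tch) = gs.foldl (pvStepB rows cols mat) (o, tch) := by
  induction gs generalizing o tch with
  | nil => rfl
  | cons g rest ih =>
    obtain ⟨x, y, d⟩ := g
    rcases o with _ | ⟨vis, nxt⟩
    · simp only [List.foldl_cons, pvStepB]
      simp only [List.foldl_cons, pvStepB] at ht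
      exact ih _ _ ht
    · have hcc : ∀ a b : Int, (mat.getD b.toNat []).getD a.toNat "" = pvCell mat b a :=
        fun a b => rfl
      have hcc' : ∀ a b : Int, (mat'.getD b.toNat []).getD a.toNat "" = pvCell mat' b a :=
        fun a b => rfl
      by_cases hv : PySem.Set.contains vis (x, y, d) = true
      · simp only [List.foldl_cons, pvStepB, hv, if_pos]
        rw [pvFoldB_none, pvFoldB_none]
      · by_cases hb : (0 ≤ x + pvDX.getD d.toNat 0 ∧ x + pvDX.getD d.toNat 0 < cols ∧
            0 ≤ y + pvDY.getD d.toNat 0 ∧ y + pvDY.getD d.toNat 0 < rows)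
        · have hmem : (x + pvDX.getD d.toNat 0, y + pvDY.getD d.toNat 0) ∈
              (((x, y, d) :: rest).foldl (pvStepB rows cols mat) (some (vis, nxt), tch)).2 := by
            simp only [List.foldl_cons, pvStepB]
            rw [if_neg hv, if_pos hb]
            split_ifs <;>
              exact pvFoldB_touched_mono _ _ _ _ _ _ _
                (by rw [PySem.Set.mem_add]; exact Or.inr rfl)
          have hnet : (x + pvDX.getD d.toNat 0, y + pvDY.getD d.toNat 0) ≠ t :=
            fun h => ht (h ▸ hmem)
          have hc := hcell _ _ hb.1 hb.2.1 hb.2.2.1 hb.2.2.2 hnet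
          simp only [pvCell] at hc
          simp only [List.foldl_cons, pvStepB] at ht ⊢
          rw [if_neg hv, if_pos hb] at ht
          rw [if_neg hv, if_pos hb, if_neg hv, if_pos hb, hc]
          by_cases hX : (mat.getD (y + pvDY.getD d.toNat 0).toNat []).getD
              (x + pvDX.getD d.toNat 0).toNat "" = "X"
          · rw [if_pos hX] at ht
            rw [if_pos hX]
            exact ih _ _ ht
          · rw [if_neg hX] at ht
            rw [if_neg hX]
            exact ih _ _ ht
        · simp only [List.foldl_cons, pvStepB] at ht ⊢
          rw [if_neg hv, if_neg hb] at ht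
          rw [if_neg hv, if_neg hb, if_neg hv, if_neg hb]
          exact ih _ _ ht

-- the whole walk is insensitive to a trap on an untouched cell
theorem pvSimB_untouched (rows cols : Int) (mat mat' : List (List String)) (t : Int × Int)
    (hcell : ∀ a b : Int, 0 ≤ a → a < cols → 0 ≤ b → b < rows → (a, b) ≠ t →
      pvCell mat' b a = pvCell mat b a)
    (fuel : Nat) (cur : List (Int × Int × Int)) (vis : PySem.Set (Int × Int × Int))
    (tch : PySem.Set (Int × Int)) (ht : t ∉ (pvSimB rows cols mat fuel cur vis tch).2) :
    pvSimB rows cols mat' fuel cur vis tch = pvSimB rows cols mat fuel cur vis tch := by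
  induction fuel generalizing cur vis tch with
  | zero =>
    cases cur with
    | nil => rfl
    | cons g rest =>
      rcases hB : (g :: rest).foldl (pvStepB rows cols mat) (some (vis, []), tch) with ⟨o, t'⟩
      have ht' : t ∉ t' := by
        intro h
        apply ht
        simp only [pvSimB, hB]
        rcases o with _ | ⟨vis', nxt⟩ <;> exact h
      have hg : (g :: rest).foldl (pvStepB rows cols mat') (some (vis, []), tch) = (o, t') := by
        rw [pvFoldB_untouched rows cols mat mat' t hcell _ _ _ (by rw [hB]; exact ht'), hB]
      simp only [pvSimB, hB, hg]
  | succ f ih =>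
    cases cur with
    | nil => rfl
    | cons g rest =>
      rcases hB : (g :: rest).foldl (pvStepB rows cols mat) (some (vis, []), tch) with ⟨o, t'⟩
      have ht' : t ∉ t' := by
        intro h
        apply ht
        simp only [pvSimB, hB]
        rcases o with _ | ⟨vis', nxt⟩
        · exact h
        · exact pvSimB_touched_mono rows cols mat f nxt vis' t' t h
      have hg : (g :: rest).foldl (pvStepB rows cols mat') (some (vis, []), tch) = (o, t') := by
        rw [pvFoldB_untouched rows cols mat mat' t hcell _ _ _ (by rw [hB]; exact ht'), hB]
      simp only [pvSimB, hB, hg]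
      rcases o with _ | ⟨vis', nxt⟩
      · rfl
      · exact ih nxt vis' t' (by
          have := ht
          simp only [pvSimB, hB] at this
          exact this)

-- placing the trap changes no other cell
theorem pvCell_setCell_ne (m : List (List String)) (yt xt y x : Int) (v : String)
    (hx : 0 ≤ x) (hy : 0 ≤ y) (hxt : 0 ≤ xt) (hyt : 0 ≤ yt)
    (hne : (x, y) ≠ (xt, yt)) :
    pvCell (pvSetCell m yt xt v) y x = pvCell m y x := by
  unfold pvCell pvSetCell
  rcases eq_or_ne yt.toNat y.toNat with hY | hY
  · have hX : xt.toNat ≠ x.toNat := by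
      intro h
      exact hne (by rw [show x = xt from by omega, show y = yt from by omega])
    rcases lt_or_ge yt.toNat m.length with hl | hl
    · have h2 : y.toNat < m.length := hY ▸ hl
      simp only [List.getD_eq_getElem?_getD, hY, List.getElem?_set_self h2,
        Option.getD_some, List.getElem?_set_ne hX]
    · rw [List.set_eq_of_length_le hl]
  · simp only [List.getD_eq_getElem?_getD, List.getElem?_set_ne hY]

-- A's nested append loop IS a flatMap comprehension (unencoded form)
theorem pvGuardsA_flat (matrix : List (List String)) (rows cols : Int) :
    (PySem.List.pyRange 0 rows 1).foldl (fun acc y =>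
      (PySem.List.pyRange 0 cols 1).foldl (fun acc x =>
        if PySem.Str.isIn (pvCell matrix y x) "^V<>" then acc ++ [(x, y, pvCell matrix y x)]
        else acc) acc) [] =
    (PySem.List.pyRange 0 rows 1).flatMap (fun y =>
      ((PySem.List.pyRange 0 cols 1).filter
          (fun x => PySem.Str.isIn (pvCell matrix y x) "^V<>")).map
        (fun x => (x, y, pvCell matrix y x))) := by
  have hinner : ∀ (acc : List (Int × Int × String)) (y : Int),
      (PySem.List.pyRange 0 cols 1).foldl (fun acc x =>
        if PySem.Str.isIn (pvCell matrix y x) "^V<>" then acc ++ [(x, y, pvCell matrix y x)]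
        else acc) acc =
      acc ++ ((PySem.List.pyRange 0 cols 1).filter
          (fun x => PySem.Str.isIn (pvCell matrix y x) "^V<>")).map
        (fun x => (x, y, pvCell matrix y x)) := by
    intro acc y
    exact PySem.List.foldl_append_if
      (p := fun x => PySem.Str.isIn (pvCell matrix y x) "^V<>")
      (f := fun x => (x, y, pvCell matrix y x)) _ _
  have h2 := PySem.List.foldl_congr_mem (PySem.List.pyRange 0 rows 1) _
    (fun acc y =>
      acc ++ ((PySem.List.pyRange 0 cols 1).filter
          (fun x => PySem.Str.isIn (pvCell matrix y x) "^V<>")).map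
        (fun x => (x, y, pvCell matrix y x)))
    ([] : List (Int × Int × String))
    (fun acc y _ => hinner acc y)
  rw [h2, PySem.List.foldl_append_eq_flatMap]
  simp

-- encoding A's guard list gives exactly B's comprehension
theorem pvGuards_eq (matrix : List (List String)) (rows cols : Int) :
    ((PySem.List.pyRange 0 rows 1).foldl (fun acc y =>
      (PySem.List.pyRange 0 cols 1).foldl (fun acc x =>
        if PySem.Str.isIn (pvCell matrix y x) "^V<>" then acc ++ [(x, y, pvCell matrix y x)]
        else acc) acc) []).map pvEncS =
    (PySem.List.pyRange 0 rows 1).flatMap (fun y =>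
      ((PySem.List.pyRange 0 cols 1).filter
          (fun x => PySem.Str.isIn (pvCell matrix y x) "^V<>")).map
        (fun x => (x, y, pvDirIdx (pvCell matrix y x)))) := by
  rw [pvGuardsA_flat matrix rows cols]
  simp [List.map_flatMap, List.map_map, Function.comp_def, pvEncS]

-- ===== VERDICT (by name: the statement is the Claim_ definition above) =====
theorem find_trap_positions_spec : Claim_equal_find_trap_positions := by
  intro matrix _hdom _hpre
  show find_trap_positions matrix = find_trap_positions_alt matrix
  simp only [find_trap_positions, find_trap_positions_alt]
  rw [← pvGuards_eq matrix (matrix.length : Int)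
    (if (matrix.length : Int) > 0 then ((matrix.headD []).length : Int) else 0)]
  apply PySem.List.foldl_congr_mem
  intro cnt y hy
  apply PySem.List.foldl_congr_mem
  intro cnt2 x hx
  rw [PySem.List.mem_pyRange_one] at hy hx
  by_cases hdot : pvCell matrix y x = "."
  · rw [if_pos hdot, if_pos hdot]
    have hinv : ∀ s ∈ (PySem.List.pyRange 0 (matrix.length : Int) 1).foldl (fun acc y =>
        (PySem.List.pyRange 0
            (if (matrix.length : Int) > 0 then ((matrix.headD []).length : Int) else 0) 1).foldl
          (fun acc x =>
            if PySem.Str.isIn (pvCell matrix y x) "^V<>" then acc ++ [(x, y, pvCell matrix y x)]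
            else acc) acc) [],
        pvInv (pvSetCell matrix y x "#") s := by
      intro s hs
      rw [pvGuardsA_flat matrix (matrix.length : Int)
        (if (matrix.length : Int) > 0 then ((matrix.headD []).length : Int) else 0)] at hs
      obtain ⟨yy, hyy, hsx⟩ := List.mem_flatMap.mp hs
      obtain ⟨xx, hxx, rfl⟩ := List.mem_map.mp hsx
      have hxf := List.mem_filter.mp hxx
      rw [PySem.List.mem_pyRange_one] at hyy
      have hxr := (PySem.List.mem_pyRange_one).mp hxf.1
      intro _h4
      have hne : (xx, yy) ≠ (x, y) := by
        intro he
        rw [Prod.mk.injEq] at he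
        obtain ⟨rfl, rfl⟩ := he
        have := hxf.2
        rw [hdot] at this
        exact absurd this (by decide)
      exact pvCell_setCell_ne matrix y x yy xx "#" hxr.1 hyy.1 hx.1 hy.1 hne
    have hsim := pvSimAB (matrix.length : Int)
      (if (matrix.length : Int) > 0 then ((matrix.headD []).length : Int) else 0)
      (pvSetCell matrix y x "#")
      (((matrix.length : Int) *
        (if (matrix.length : Int) > 0 then ((matrix.headD []).length : Int) else 0)).toNat)
      _ [] [] hinv (by simp)
    simp only [List.map_nil] at hsim
    rw [← hsim]
    by_cases hcont : PySem.Set.contains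
        (pvSimB (matrix.length : Int)
          (if (matrix.length : Int) > 0 then ((matrix.headD []).length : Int) else 0)
          matrix
          (((matrix.length : Int) *
            (if (matrix.length : Int) > 0 then ((matrix.headD []).length : Int) else 0)).toNat)
          (((PySem.List.pyRange 0 (matrix.length : Int) 1).foldl (fun acc y =>
            (PySem.List.pyRange 0
                (if (matrix.length : Int) > 0 then ((matrix.headD []).length : Int) else 0) 1).foldl
              (fun acc x =>
                if PySem.Str.isIn (pvCell matrix y x) "^V<>" then acc ++ [(x, y, pvCell matrix y x)]
                else acc) acc) []).map pvEncS) [] []).2 (x, y) = true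
    · rw [if_pos hcont]
    · rw [if_neg hcont]
      have hnt := fun h => hcont ((PySem.Set.contains_iff _ _).mpr h)
      rw [pvSimB_untouched _ _ matrix (pvSetCell matrix y x "#") (x, y)
        (fun a b ha _hac hb _hbr hne =>
          pvCell_setCell_ne matrix y x b a "#" ha hb hx.1 hy.1 hne)
        _ _ [] [] hnt]
      split_ifs <;> omega
  · rw [if_neg hdot, if_neg hdot]
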